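-- pv_equiv track=rewrite | github.com/Delta-Life/Bioinformatics | Rosalind/Bioinformatics Textbook Track/code/BA1E.py | clump
-- ===== SOURCE A (Python) =====
-- def clump(k, l, t, strand):
--     frequency_table = {}
--     result = []
--
--     for i in range(len(strand) - k + 1):
--         if strand[i:i+k] in frequency_table:
--             frequency_table[strand[i:i+k]][0] += 1
--             frequency_table[strand[i:i+k]].append(i)
--         else:
--             frequency_table[strand[i:i+k]] = [1, i]
--
--     for i in frequency_table:
--         if frequency_table[i][0] >= t:
--             for index in range(1, len(frequency_table[i])-t+1):
--                 if frequency_table[i][index+t-1] - frequency_table[i][index] <= l - k: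
--                     result.append(i)
--                     break
--
--     return sorted(result)
-- ===== SOURCE B (Python) =====
-- def clump(k, l, t, strand):
--     # Sliding window over k-mer start positions: keep counts of the k-mers
--     # whose start lies in the last (l - k + 1) positions; a k-mer clumps as
--     # soon as its in-window count reaches t.
--     n = len(strand)
--     kmers = [strand[i:i+k] for i in range(n - k + 1)]
--     m = l - k + 1  # width of the window in start positions
--     if m <= 0:
--         return []
--     counts = {}
--     found = set()
--     for i, km in enumerate(kmers):
--         counts[km] = counts.get(km, 0) + 1
--         if i - m >= 0:
--             counts[kmers[i - m]] -= 1
--         if counts[km] >= t: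
--             found.add(km)
--     return sorted(found)
-- ===== Notes on version B (the rewrite author's own statement) =====
-- stated objective: alternative
-- what changed: A collects every k-mer's full occurrence-position list in one dict pass and then, per k-mer, scans windows of t consecutive occurrences for a span at most l-k; B instead slides a single window of l-k+1 start positions across the strand, incrementally incrementing the entering k-mer's count and decrementing the leaving one's, adding a k-mer to the result set the moment its in-window count reaches t.
-- outside the precondition, e.g. on clump(1, -1, 0, 'CACCAC'): A returns ['A', 'C'], B returns []; on clump(1, 1, 0, 'A'): A raises IndexError, B returns ['A']
import Mathlib
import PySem

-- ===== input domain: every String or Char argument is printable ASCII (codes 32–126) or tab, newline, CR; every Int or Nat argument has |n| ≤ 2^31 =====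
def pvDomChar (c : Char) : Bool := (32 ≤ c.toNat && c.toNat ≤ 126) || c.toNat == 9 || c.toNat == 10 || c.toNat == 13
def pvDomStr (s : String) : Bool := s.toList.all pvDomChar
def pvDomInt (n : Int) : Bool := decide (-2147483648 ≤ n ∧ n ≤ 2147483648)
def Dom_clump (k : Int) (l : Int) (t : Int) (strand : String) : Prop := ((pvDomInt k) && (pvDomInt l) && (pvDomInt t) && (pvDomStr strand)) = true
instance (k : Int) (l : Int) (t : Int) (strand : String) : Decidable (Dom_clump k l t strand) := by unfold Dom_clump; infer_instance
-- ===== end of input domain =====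

-- B replaces A's per-k-mer scans over globally collected occurrence lists by a single
-- sliding window over k-mer start positions with incrementally maintained counts (alternative algorithm).

-- ===== PORT A =====
def clump (k : Int) (l : Int) (t : Int) (strand : String) : List String :=
  let cs := strand.toList
  let ft := (PySem.List.pyRange 0 ((cs.length : Int) - k + 1) 1).foldl
    (fun (ft : PySem.Dict (List Char) (List Int)) i =>
      let km := PySem.List.slice cs (some i) (some (i + k))
      if ft.contains km then
        ft.modify km [] (fun v => PySem.List.pySetD v 0 (PySem.List.pyGetD v 0 0 + 1) ++ [i])
      else
        ft.insert km [1, i])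
    PySem.Dict.empty
  let result := ft.keys.foldl
    (fun (res : List String) km =>
      let v := ft.getD km []
      if t ≤ PySem.List.pyGetD v 0 0 then
        if (PySem.List.pyRange 1 ((v.length : Int) - t + 1) 1).any
            (fun idx => decide (PySem.List.pyGetD v (idx + t - 1) 0 - PySem.List.pyGetD v idx 0 ≤ l - k)) then
          res ++ [String.ofList km]
        else res
      else res)
    []
  PySem.List.sorted result (fun x => x)

-- ===== PORT B =====
def clump_alt (k : Int) (l : Int) (t : Int) (strand : String) : List String :=
  let cs := strand.toList
  let kmers := (PySem.List.pyRange 0 ((cs.length : Int) - k + 1) 1).map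
    (fun i => PySem.List.slice cs (some i) (some (i + k)))
  let m := l - k + 1
  if m ≤ 0 then []
  else
    let st := (PySem.List.enumerate kmers 0).foldl
      (fun (st : PySem.Dict (List Char) Int × PySem.Set (List Char)) p =>
        let counts := st.1.insert p.2 (st.1.getD p.2 0 + 1)
        let counts := if 0 ≤ p.1 - m then
            counts.insert (PySem.List.pyGetD kmers (p.1 - m) [])
              (counts.getD (PySem.List.pyGetD kmers (p.1 - m) []) 0 - 1)
          else counts
        let found := if t ≤ counts.getD p.2 0 then st.2.add p.2 else st.2
        (counts, found))
      (PySem.Dict.empty, PySem.Set.ofList [])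
    PySem.List.sorted (st.2.map String.ofList) (fun x => x)

-- ===== PRECONDITION & SPEC =====
-- Pre_ excludes t ≤ 0, where A's inner occurrence scan raises IndexError on part of that
-- region and, where it does return, its value depends on reading the count cell / negative-index
-- wraparound of the positions list — accidents of A's list layout.
def Pre_clump (k : Int) (l : Int) (t : Int) (strand : String) : Prop := 1 ≤ t
instance (k : Int) (l : Int) (t : Int) (strand : String) : Decidable (Pre_clump k l t strand) := by unfold Pre_clump; infer_instance
def pvWitness_clump : Int × Int × Int × String := (2, 4, 2, "ACACA")

def Spec_clump (k : Int) (l : Int) (t : Int) (strand : String) (out : List String) : Prop := out = clump_alt k l t strand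
instance (k : Int) (l : Int) (t : Int) (strand : String) (out : List String) : Decidable (Spec_clump k l t strand out) := by unfold Spec_clump; infer_instance

-- ===== CLAIM (what is proved, stated in full; the proofs are below) =====
def Claim_equal_clump : Prop := ∀ (k : Int) (l : Int) (t : Int) (strand : String), Dom_clump k l t strand → Pre_clump k l t strand → Spec_clump k l t strand (clump k l t strand)

-- ===== LEMMAS AND PROOFS =====

-- number of k-mer start positions
def pvN (k : Int) (cs : List Char) : Nat := (((cs.length : Int)) - k + 1).toNat
-- the k-mer starting at position i
def pvKm (k : Int) (cs : List Char) (i : Nat) : List Char :=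
  PySem.List.slice cs (some (i : Int)) (some ((i : Int) + k))
-- the list of all k-mers, by start position
def pvKmers (k : Int) (cs : List Char) : List (List Char) :=
  (List.range (pvN k cs)).map (pvKm k cs)
-- occurrences of k-mer x among the positions is
def pvOccIs (k : Int) (cs : List Char) (is : List Nat) (x : List Char) : List Nat :=
  is.filter (fun i => decide (pvKm k cs i = x))
-- all start positions of k-mer x (increasing)
def pvOcc (k : Int) (cs : List Char) (x : List Char) : List Nat :=
  pvOccIs k cs (List.range (pvN k cs)) x
-- count of x among the k-mers of the current window: last mN of the first s start positions
def pvWin (k : Int) (cs : List Char) (mN s : Nat) (x : List Char) : Nat :=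
  (((pvKmers k cs).take s).drop (s - mN)).count x
-- B's acceptance condition: at some occurrence the window count reaches t
def pvB (k l t : Int) (cs : List Char) (x : List Char) : Prop :=
  ∃ i, i < pvN k cs ∧ pvKm k cs i = x ∧ t ≤ ((pvWin k cs (l - k + 1).toNat (i + 1) x : Nat) : Int)
-- A's acceptance condition: t consecutive occurrences spanning at most l - k
def pvG (k l t : Int) (cs : List Char) (x : List Char) : Prop :=
  ∃ j b : Nat, b + 1 = j + t.toNat ∧ b < (pvOcc k cs x).length ∧
    (((pvOcc k cs x).getD b 0 : Int) - ((pvOcc k cs x).getD j 0 : Int) ≤ l - k)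

-- A's first loop, as a function of the (Nat) position list
def pvFt (k : Int) (cs : List Char) (is : List Nat) : PySem.Dict (List Char) (List Int) :=
  is.foldl (fun ft i =>
    if ft.contains (pvKm k cs i) then
      ft.modify (pvKm k cs i) [] (fun v => PySem.List.pySetD v 0 (PySem.List.pyGetD v 0 0 + 1) ++ [(i : Int)])
    else ft.insert (pvKm k cs i) [(1 : Int), (i : Int)]) PySem.Dict.empty

-- A's per-key test, as the port's boolean
def pvPA (k l t : Int) (cs : List Char) (x : List Char) : Bool :=
  let v := (pvFt k cs (List.range (pvN k cs))).getD x []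
  decide (t ≤ PySem.List.pyGetD v 0 0) &&
    (PySem.List.pyRange 1 ((v.length : Int) - t + 1) 1).any
      (fun idx => decide (PySem.List.pyGetD v (idx + t - 1) 0 - PySem.List.pyGetD v idx 0 ≤ l - k))

-- B's loop step and loop state after s steps
def pvStepB (k l t : Int) (cs : List Char)
    (st : PySem.Dict (List Char) Int × PySem.Set (List Char)) (p : Int × List Char) :
    PySem.Dict (List Char) Int × PySem.Set (List Char) :=
  let counts := st.1.insert p.2 (st.1.getD p.2 0 + 1)
  let counts := if 0 ≤ p.1 - (l - k + 1) then
      counts.insert (PySem.List.pyGetD (pvKmers k cs) (p.1 - (l - k + 1)) [])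
        (counts.getD (PySem.List.pyGetD (pvKmers k cs) (p.1 - (l - k + 1)) []) 0 - 1)
    else counts
  let found := if t ≤ counts.getD p.2 0 then st.2.add p.2 else st.2
  (counts, found)

def pvStB (k l t : Int) (cs : List Char) (s : Nat) :
    PySem.Dict (List Char) Int × PySem.Set (List Char) :=
  (PySem.List.enumerate ((pvKmers k cs).take s) 0).foldl (pvStepB k l t cs)
    (PySem.Dict.empty, PySem.Set.ofList [])

-- ---------- A-side characterisation ----------

lemma pvFt_append (k : Int) (cs : List Char) (is : List Nat) (i : Nat) :
    pvFt k cs (is ++ [i]) =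
      (if (pvFt k cs is).contains (pvKm k cs i) then
        (pvFt k cs is).modify (pvKm k cs i) []
          (fun v => PySem.List.pySetD v 0 (PySem.List.pyGetD v 0 0 + 1) ++ [(i : Int)])
      else (pvFt k cs is).insert (pvKm k cs i) [(1 : Int), (i : Int)]) := by
  simp [pvFt, List.foldl_append]

lemma pvOccIs_append (k : Int) (cs : List Char) (is : List Nat) (i : Nat) (x : List Char) :
    pvOccIs k cs (is ++ [i]) x =
      pvOccIs k cs is x ++ (if pvKm k cs i = x then [i] else []) := by
  simp only [pvOccIs, List.filter_append, List.filter_cons, List.filter_nil]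
  split_ifs with h h' h' <;> simp_all

lemma pvExists_append (k : Int) (cs : List Char) (is : List Nat) (i : Nat) (x : List Char) :
    (∃ j ∈ is ++ [i], pvKm k cs j = x) ↔ (∃ j ∈ is, pvKm k cs j = x) ∨ pvKm k cs i = x := by
  constructor
  · rintro ⟨j, hj, hx⟩
    rcases List.mem_append.mp hj with h | h
    · exact Or.inl ⟨j, h, hx⟩
    · have : j = i := by simpa using h
      exact Or.inr (this ▸ hx)
  · rintro (⟨j, hj, hx⟩ | h)
    · exact ⟨j, List.mem_append.mpr (Or.inl hj), hx⟩
    · exact ⟨i, List.mem_append.mpr (Or.inr (by simp)), h⟩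

lemma pvFt_keys_mem (k : Int) (cs : List Char) (is : List Nat) (x : List Char) :
    x ∈ (pvFt k cs is).keys ↔ ∃ i ∈ is, pvKm k cs i = x := by
  induction is using List.reverseRecOn generalizing x with
  | nil => simp [pvFt, PySem.Dict.keys_empty]
  | append_singleton is i ih =>
    rw [pvFt_append, pvExists_append]
    by_cases hc : (pvFt k cs is).contains (pvKm k cs i) = true
    · rw [if_pos hc, PySem.Dict.keys_modify,
        PySem.Dict.keys_insert_of_contains _ _ hc, ih]
      have hmem : ∃ j ∈ is, pvKm k cs j = pvKm k cs i := by
        rw [PySem.Dict.contains_eq_decide_mem_keys] at hc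
        exact (ih _).mp (of_decide_eq_true hc)
      constructor
      · exact Or.inl
      · rintro (h | h)
        · exact h
        · rcases hmem with ⟨j, hj, hx⟩
          exact ⟨j, hj, h ▸ hx⟩
    · rw [if_neg hc, PySem.Dict.keys_insert_of_not_contains _ _ (by simpa using hc)]
      simp only [List.mem_append, List.mem_singleton, ih]
      constructor
      · rintro (h | h)
        · exact Or.inl h
        · exact Or.inr h.symm
      · rintro (h | h)
        · exact Or.inl h
        · exact Or.inr h.symm

lemma pvFt_contains (k : Int) (cs : List Char) (is : List Nat) (x : List Char) :
    (pvFt k cs is).contains x = true ↔ ∃ i ∈ is, pvKm k cs i = x := by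
  rw [PySem.Dict.contains_eq_decide_mem_keys, decide_eq_true_eq, pvFt_keys_mem]

lemma pvFt_keys_nodup (k : Int) (cs : List Char) (is : List Nat) :
    (pvFt k cs is).keys.Nodup := by
  induction is using List.reverseRecOn with
  | nil => exact PySem.Dict.nodup_keys_empty
  | append_singleton is i ih =>
    rw [pvFt_append]
    by_cases hc : (pvFt k cs is).contains (pvKm k cs i) = true
    · rw [if_pos hc, PySem.Dict.keys_modify, PySem.Dict.keys_insert_of_contains _ _ hc]
      exact ih
    · rw [if_neg hc]
      exact PySem.Dict.nodup_keys_insert _ _ _ ih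

lemma pvOccIs_nil_iff (k : Int) (cs : List Char) (is : List Nat) (x : List Char) :
    pvOccIs k cs is x = [] ↔ ¬ ∃ i ∈ is, pvKm k cs i = x := by
  simp [pvOccIs, List.filter_eq_nil_iff]

lemma pvFt_getD (k : Int) (cs : List Char) (is : List Nat) (x : List Char) :
    (pvFt k cs is).getD x [] =
      if pvOccIs k cs is x = [] then []
      else ((pvOccIs k cs is x).length : Int) :: (pvOccIs k cs is x).map (fun (i : Nat) => (i : Int)) := by
  induction is using List.reverseRecOn generalizing x with
  | nil => simp [pvFt, pvOccIs, PySem.Dict.getD_empty]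
  | append_singleton is i ih =>
    rw [pvFt_append, pvOccIs_append]
    by_cases hc : (pvFt k cs is).contains (pvKm k cs i) = true
    · rw [if_pos hc, PySem.Dict.getD_modify]
      have hocc : ¬ pvOccIs k cs is (pvKm k cs i) = [] := by
        rw [pvOccIs_nil_iff]
        exact not_not_intro ((pvFt_contains k cs is (pvKm k cs i)).mp hc)
      by_cases hx : pvKm k cs i = x
      · subst hx
        rw [if_pos rfl, if_pos rfl, ih, if_neg hocc]
        have hne : ¬ (pvOccIs k cs is (pvKm k cs i) ++ [i]) = [] := by simp
        rw [if_neg hne, PySem.List.pyGetD_zero_cons,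
          PySem.List.pySetD_of_nonneg _ _ (le_refl (0 : Int))]
        simp only [Int.toNat_zero, List.set_cons_zero, List.map_append, List.cons_append,
          List.length_append, List.length_singleton, List.map_cons, List.map_nil]
        push_cast
        simp
      · rw [if_neg hx, if_neg (fun h => hx h.symm), ih, List.append_nil]
    · rw [if_neg hc, PySem.Dict.getD_insert]
      have hocc : pvOccIs k cs is (pvKm k cs i) = [] := by
        rw [pvOccIs_nil_iff]
        intro h; exact hc ((pvFt_contains k cs is (pvKm k cs i)).mpr h)
      by_cases hx : pvKm k cs i = x
      · subst hx
        rw [if_pos rfl, if_pos rfl, hocc, List.nil_append]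
        norm_num
      · rw [if_neg hx, if_neg (fun h => hx h.symm), ih, List.append_nil]

def pvARes (k l t : Int) (cs : List Char) : List String :=
  (pvFt k cs (List.range (pvN k cs))).keys.foldl
    (fun res km =>
      let v := (pvFt k cs (List.range (pvN k cs))).getD km []
      if t ≤ PySem.List.pyGetD v 0 0 then
        if (PySem.List.pyRange 1 ((v.length : Int) - t + 1) 1).any
            (fun idx => decide (PySem.List.pyGetD v (idx + t - 1) 0 - PySem.List.pyGetD v idx 0 ≤ l - k)) then
          res ++ [String.ofList km]
        else res
      else res) []

lemma clump_eq1 (k l t : Int) (strand : String) :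
    clump k l t strand = PySem.List.sorted (pvARes k l t strand.toList) (fun x => x) := by
  unfold clump pvARes
  simp only [PySem.List.pyRange_one, List.foldl_map, zero_add, sub_zero]
  rfl

lemma clump_eq2 (k l t : Int) (cs : List Char) :
    pvARes k l t cs =
      ((pvFt k cs (List.range (pvN k cs))).keys.filter (pvPA k l t cs)).map String.ofList := by
  unfold pvARes
  have hL : (fun (res : List String) (km : List Char) =>
      let v := (pvFt k cs (List.range (pvN k cs))).getD km []
      if t ≤ PySem.List.pyGetD v 0 0 then
        if (PySem.List.pyRange 1 ((v.length : Int) - t + 1) 1).any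
            (fun idx => decide (PySem.List.pyGetD v (idx + t - 1) 0 - PySem.List.pyGetD v idx 0 ≤ l - k)) then
          res ++ [String.ofList km]
        else res
      else res)
      = fun res km => if pvPA k l t cs km = true then res ++ [String.ofList km] else res := by
    funext res km
    dsimp only
    by_cases h1 : t ≤ PySem.List.pyGetD ((pvFt k cs (List.range (pvN k cs))).getD km []) 0 0
    · by_cases h2 : ((PySem.List.pyRange 1
          ((((pvFt k cs (List.range (pvN k cs))).getD km []).length : Int) - t + 1) 1).any
          (fun idx => decide (PySem.List.pyGetD ((pvFt k cs (List.range (pvN k cs))).getD km []) (idx + t - 1) 0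
            - PySem.List.pyGetD ((pvFt k cs (List.range (pvN k cs))).getD km []) idx 0 ≤ l - k))) = true
      · rw [if_pos h1, if_pos h2, if_pos (show pvPA k l t cs km = true by
          unfold pvPA; dsimp only; rw [decide_eq_true h1, h2]; rfl)]
      · rw [if_pos h1, if_neg h2, if_neg (show ¬ pvPA k l t cs km = true by
          unfold pvPA; dsimp only; intro h; exact h2 (Bool.and_eq_true_iff.mp h).2)]
    · rw [if_neg h1, if_neg (show ¬ pvPA k l t cs km = true by
          unfold pvPA; dsimp only; intro h
          exact h1 (of_decide_eq_true (Bool.and_eq_true_iff.mp h).1))]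
  rw [hL, PySem.List.foldl_append_if, List.nil_append]

lemma clump_eq (k l t : Int) (strand : String) :
    clump k l t strand =
      PySem.List.sorted
        (((pvFt k strand.toList (List.range (pvN k strand.toList))).keys.filter
            (pvPA k l t strand.toList)).map String.ofList) (fun x => x) := by
  rw [clump_eq1, clump_eq2]

lemma pvV_get (occ : List Nat) (idx : Int) (h1 : 1 ≤ idx) (h2 : idx ≤ (occ.length : Int)) :
    PySem.List.pyGetD (((occ.length : Nat) : Int) :: occ.map (fun (i : Nat) => (i : Int))) idx 0
      = ((occ.getD (idx.toNat - 1) 0 : Nat) : Int) := by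
  rw [PySem.List.pyGetD_eq_getElem _ _ (by omega) (by simp; omega)]
  obtain ⟨n, hn⟩ : ∃ n, idx.toNat = n + 1 := ⟨idx.toNat - 1, by omega⟩
  simp only [hn, List.getElem_cons_succ, List.getElem_map, Nat.add_sub_cancel]
  have hlt : n < occ.length := by omega
  rw [List.getD_eq_getElem?_getD, List.getElem?_eq_getElem hlt]
  simp

lemma pvPA_iff_G (k l t : Int) (cs : List Char) (x : List Char) (ht : 1 ≤ t) :
    pvPA k l t cs x = true ↔ pvG k l t cs x := by
  unfold pvPA pvG pvOcc
  dsimp only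
  rw [pvFt_getD]
  set occ := pvOccIs k cs (List.range (pvN k cs)) x with hocc
  by_cases h0 : occ = []
  · rw [if_pos h0]
    constructor
    · intro h
      exfalso
      have h1 := of_decide_eq_true (Bool.and_eq_true_iff.mp h).1
      rw [PySem.List.pyGetD_zero] at h1
      simp at h1
      omega
    · rintro ⟨j, b, hb1, hb2, _⟩
      rw [h0] at hb2
      simp at hb2
  · rw [if_neg h0]
    constructor
    · intro h
      obtain ⟨hA, hB⟩ := Bool.and_eq_true_iff.mp h
      have h1 : t ≤ (occ.length : Int) := by
        have := of_decide_eq_true hA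
        rwa [PySem.List.pyGetD_zero_cons] at this
      rw [List.any_eq_true] at hB
      obtain ⟨idx, hmem, hcond⟩ := hB
      rw [PySem.List.mem_pyRange_one] at hmem
      simp only [List.length_cons, List.length_map] at hmem
      push_cast at hmem
      obtain ⟨hm1, hm2⟩ := hmem
      have hcond' := of_decide_eq_true hcond
      rw [pvV_get occ idx hm1 (by omega), pvV_get occ (idx + t - 1) (by omega) (by omega)] at hcond'
      refine ⟨idx.toNat - 1, (idx + t - 1).toNat - 1, by omega, by omega, hcond'⟩
    · rintro ⟨j, b, hb1, hb2, hspan⟩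
      apply Bool.and_eq_true_iff.mpr
      refine ⟨decide_eq_true (by rw [PySem.List.pyGetD_zero_cons]; omega), ?_⟩
      rw [List.any_eq_true]
      refine ⟨(j : Int) + 1, ?_, ?_⟩
      · rw [PySem.List.mem_pyRange_one]
        simp only [List.length_cons, List.length_map]
        push_cast
        omega
      · apply decide_eq_true
        rw [pvV_get occ _ (by omega) (by omega), pvV_get occ _ (by omega) (by omega)]
        have e1 : ((j : Int) + 1).toNat - 1 = j := by omega
        have e2 : ((j : Int) + 1 + t - 1).toNat - 1 = b := by omega
        rw [e1, e2]
        exact hspan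

-- ---------- B-side characterisation ----------

lemma pvKmers_take_all (k : Int) (cs : List Char) :
    (pvKmers k cs).take (pvN k cs) = pvKmers k cs := by
  have : (pvKmers k cs).length = pvN k cs := by simp [pvKmers]
  rw [← this, List.take_length]

lemma clump_alt_eq (k l t : Int) (strand : String) (hm : ¬ l - k + 1 ≤ 0) :
    clump_alt k l t strand =
      PySem.List.sorted (((pvStB k l t strand.toList (pvN k strand.toList)).2).map String.ofList)
        (fun x => x) := by
  unfold clump_alt pvStB
  rw [pvKmers_take_all]
  simp only [PySem.List.pyRange_one, List.map_map, zero_add, sub_zero, if_neg hm]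
  rfl

lemma pvKmers_length (k : Int) (cs : List Char) : (pvKmers k cs).length = pvN k cs := by
  simp [pvKmers]

lemma pvKmers_getElem (k : Int) (cs : List Char) (j : Nat) (h : j < pvN k cs) :
    (pvKmers k cs)[j]'(by rw [pvKmers_length]; exact h) = pvKm k cs j := by
  simp [pvKmers]

lemma pvKmers_take_succ (k : Int) (cs : List Char) (s : Nat) (hs : s < pvN k cs) :
    (pvKmers k cs).take (s + 1) = (pvKmers k cs).take s ++ [pvKm k cs s] := by
  rw [List.take_add_one, List.getElem?_eq_getElem (by rw [pvKmers_length]; exact hs)]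
  rw [pvKmers_getElem k cs s hs]
  rfl

lemma pvWin_succ_lt (k : Int) (cs : List Char) (mN s : Nat) (x : List Char)
    (hs : s < pvN k cs) (hlt : s < mN) :
    pvWin k cs mN (s + 1) x = pvWin k cs mN s x + (if pvKm k cs s = x then 1 else 0) := by
  unfold pvWin
  rw [pvKmers_take_succ k cs s hs]
  have h1 : s + 1 - mN = 0 := by omega
  have h2 : s - mN = 0 := by omega
  rw [h1, h2, List.drop_zero, List.drop_zero, List.count_append]
  simp [List.count_cons, beq_iff_eq]

lemma pvWin_succ_ge (k : Int) (cs : List Char) (mN s : Nat) (x : List Char)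
    (hs : s < pvN k cs) (hge : mN ≤ s) (hm : 1 ≤ mN) :
    pvWin k cs mN (s + 1) x + (if pvKm k cs (s - mN) = x then 1 else 0)
      = pvWin k cs mN s x + (if pvKm k cs s = x then 1 else 0) := by
  unfold pvWin
  rw [pvKmers_take_succ k cs s hs]
  have hlen : ((pvKmers k cs).take s).length = s := by
    rw [List.length_take, pvKmers_length]; omega
  rw [List.drop_append_of_le_length (by omega), List.count_append]
  have hdrop : List.drop (s - mN) ((pvKmers k cs).take s)
      = ((pvKmers k cs).take s)[s - mN]'(by omega) :: List.drop (s - mN + 1) ((pvKmers k cs).take s) :=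
    List.drop_eq_getElem_cons (by omega)
  have hget : ((pvKmers k cs).take s)[s - mN]'(by omega) = pvKm k cs (s - mN) := by
    rw [List.getElem_take]
    exact pvKmers_getElem k cs (s - mN) (by omega)
  have hidx : s - mN + 1 = s + 1 - mN := by omega
  rw [hdrop, hget, hidx, List.count_cons]
  simp only [List.count_cons, List.count_nil, beq_iff_eq]
  split_ifs with h1 h2 h2 <;> omega

lemma pvStB_zero (k l t : Int) (cs : List Char) :
    pvStB k l t cs 0 = (PySem.Dict.empty, PySem.Set.ofList []) := by
  simp [pvStB]

lemma pvStB_succ (k l t : Int) (cs : List Char) (s : Nat) (hs : s < pvN k cs) :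
    pvStB k l t cs (s + 1) = pvStepB k l t cs (pvStB k l t cs s) ((s : Int), pvKm k cs s) := by
  unfold pvStB
  rw [pvKmers_take_succ k cs s hs, PySem.List.enumerate_append, List.foldl_append]
  have hlen : ((pvKmers k cs).take s).length = s := by
    rw [List.length_take, pvKmers_length]; omega
  rw [hlen]
  simp [PySem.List.enumerate]

lemma pvStB_inv (k l t : Int) (cs : List Char) (hm : 1 ≤ l - k + 1) :
    ∀ s, s ≤ pvN k cs →
      (∀ x, (pvStB k l t cs s).1.getD x 0 = ((pvWin k cs (l - k + 1).toNat s x : Nat) : Int)) ∧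
      (∀ x, x ∈ (pvStB k l t cs s).2 ↔
        ∃ i, i < s ∧ pvKm k cs i = x ∧ t ≤ ((pvWin k cs (l - k + 1).toNat (i + 1) x : Nat) : Int)) ∧
      ((pvStB k l t cs s).2 : List (List Char)).Nodup := by
  set mN := (l - k + 1).toNat with hmN
  have hmc : ((mN : Nat) : Int) = l - k + 1 := by omega
  have hm1 : 1 ≤ mN := by omega
  intro s
  induction s with
  | zero =>
    intro _
    rw [pvStB_zero]
    refine ⟨fun x => by simp [PySem.Dict.getD_empty, pvWin], fun x => ?_, ?_⟩
    · rw [PySem.Set.mem_ofList]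
      simp
    · exact PySem.Set.nodup_ofList []
  | succ s ih =>
    intro hs1
    have hs : s < pvN k cs := by omega
    obtain ⟨ihc, ihf, ihn⟩ := ih (by omega)
    rw [pvStB_succ k l t cs s hs]
    unfold pvStepB
    dsimp only
    -- the incoming k-mer count
    have hcnt1 : ∀ x, ((pvStB k l t cs s).1.insert (pvKm k cs s)
        ((pvStB k l t cs s).1.getD (pvKm k cs s) 0 + 1)).getD x 0
        = ((pvWin k cs mN s x : Nat) : Int) + (if x = pvKm k cs s then 1 else 0) := by
      intro x
      rw [PySem.Dict.getD_insert]
      split_ifs with h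
      · rw [h, ihc]
      · rw [ihc]; ring
    by_cases hc : (0 : Int) ≤ (s : Int) - (l - k + 1)
    · -- a k-mer leaves the window
      rw [if_pos hc]
      have hge : mN ≤ s := by omega
      have hout : PySem.List.pyGetD (pvKmers k cs) ((s : Int) - (l - k + 1)) []
          = pvKm k cs (s - mN) := by
        rw [PySem.List.pyGetD_eq_getElem _ _ hc (by rw [pvKmers_length]; omega)]
        have heq : ((s : Int) - (l - k + 1)).toNat = s - mN := by omega
        simp only [heq]
        exact pvKmers_getElem k cs (s - mN) (by omega)
      rw [hout]
      have hcnt2 : ∀ x, (((pvStB k l t cs s).1.insert (pvKm k cs s)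
          ((pvStB k l t cs s).1.getD (pvKm k cs s) 0 + 1)).insert (pvKm k cs (s - mN))
            (((pvStB k l t cs s).1.insert (pvKm k cs s)
              ((pvStB k l t cs s).1.getD (pvKm k cs s) 0 + 1)).getD (pvKm k cs (s - mN)) 0 - 1)).getD x 0
          = ((pvWin k cs mN (s + 1) x : Nat) : Int) := by
        intro x
        rw [PySem.Dict.getD_insert]
        have hwin := pvWin_succ_ge k cs mN s x hs hge hm1
        simp only [hcnt1]
        by_cases h1 : x = pvKm k cs (s - mN)
        · subst h1
          rw [if_pos rfl]
          rw [if_pos rfl] at hwin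
          by_cases h2 : pvKm k cs (s - mN) = pvKm k cs s
          · rw [if_pos h2]
            rw [if_pos h2.symm] at hwin
            omega
          · rw [if_neg h2]
            rw [if_neg (fun hh => h2 hh.symm)] at hwin
            omega
        · rw [if_neg h1]
          rw [if_neg (fun hh => h1 hh.symm)] at hwin
          by_cases h2 : x = pvKm k cs s
          · rw [if_pos h2]
            rw [if_pos h2.symm] at hwin
            omega
          · rw [if_neg h2]
            rw [if_neg (fun hh => h2 hh.symm)] at hwin
            omega
      refine ⟨hcnt2, ?_, ?_⟩
      · intro x
        rw [hcnt2]
        split_ifs with hadd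
        · rw [PySem.Set.mem_add]
          constructor
          · rintro (h | h)
            · obtain ⟨i, hi, hik, hiw⟩ := (ihf x).mp h
              exact ⟨i, by omega, hik, hiw⟩
            · exact ⟨s, by omega, h.symm, by rw [h]; exact hadd⟩
          · rintro ⟨i, hi, hik, hiw⟩
            by_cases his : i = s
            · exact Or.inr (by rw [← hik, his])
            · exact Or.inl ((ihf x).mpr ⟨i, by omega, hik, hiw⟩)
        · constructor
          · intro h
            obtain ⟨i, hi, hik, hiw⟩ := (ihf x).mp h
            exact ⟨i, by omega, hik, hiw⟩
          · rintro ⟨i, hi, hik, hiw⟩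
            by_cases his : i = s
            · subst his
              exact absurd (by rw [hik]; exact hiw) hadd
            · exact (ihf x).mpr ⟨i, by omega, hik, hiw⟩
      · split_ifs with hadd
        · exact PySem.Set.nodup_add _ _ ihn
        · exact ihn
    · -- window still growing
      rw [if_neg hc]
      have hlt : s < mN := by omega
      have hcnt2 : ∀ x, ((pvStB k l t cs s).1.insert (pvKm k cs s)
          ((pvStB k l t cs s).1.getD (pvKm k cs s) 0 + 1)).getD x 0
          = ((pvWin k cs mN (s + 1) x : Nat) : Int) := by
        intro x
        rw [hcnt1, pvWin_succ_lt k cs mN s x hs hlt]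
        by_cases h2 : x = pvKm k cs s
        · rw [if_pos h2, if_pos h2.symm]
          omega
        · rw [if_neg h2, if_neg (fun hh => h2 hh.symm)]
          omega
      refine ⟨hcnt2, ?_, ?_⟩
      · intro x
        rw [hcnt2]
        split_ifs with hadd
        · rw [PySem.Set.mem_add]
          constructor
          · rintro (h | h)
            · obtain ⟨i, hi, hik, hiw⟩ := (ihf x).mp h
              exact ⟨i, by omega, hik, hiw⟩
            · exact ⟨s, by omega, h.symm, by rw [h]; exact hadd⟩
          · rintro ⟨i, hi, hik, hiw⟩
            by_cases his : i = s
            · exact Or.inr (by rw [← hik, his])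
            · exact Or.inl ((ihf x).mpr ⟨i, by omega, hik, hiw⟩)
        · constructor
          · intro h
            obtain ⟨i, hi, hik, hiw⟩ := (ihf x).mp h
            exact ⟨i, by omega, hik, hiw⟩
          · rintro ⟨i, hi, hik, hiw⟩
            by_cases his : i = s
            · subst his
              exact absurd (by rw [hik]; exact hiw) hadd
            · exact (ihf x).mpr ⟨i, by omega, hik, hiw⟩
      · split_ifs with hadd
        · exact PySem.Set.nodup_add _ _ ihn
        · exact ihn

-- ---------- the combinatorial core ----------

lemma pvOcc_mem (k : Int) (cs : List Char) (x : List Char) (i : Nat) :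
    i ∈ pvOcc k cs x ↔ i < pvN k cs ∧ pvKm k cs i = x := by
  simp [pvOcc, pvOccIs, List.mem_filter, List.mem_range]

lemma pvOcc_pairwise (k : Int) (cs : List Char) (x : List Char) :
    (pvOcc k cs x).Pairwise (· < ·) :=
  List.Pairwise.filter _ List.pairwise_lt_range

lemma pvGetD_eq (l : List Nat) (n : Nat) (h : n < l.length) : l.getD n 0 = l[n] := by
  rw [List.getD_eq_getElem?_getD, List.getElem?_eq_getElem h]
  rfl

lemma pvOcc_mono (k : Int) (cs : List Char) (x : List Char) (a b : Nat)
    (hab : a ≤ b) (hb : b < (pvOcc k cs x).length) :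
    (pvOcc k cs x).getD a 0 ≤ (pvOcc k cs x).getD b 0 := by
  have ha : a < (pvOcc k cs x).length := by omega
  rw [pvGetD_eq _ _ ha, pvGetD_eq _ _ hb]
  rcases Nat.eq_or_lt_of_le hab with h | h
  · subst h; exact le_rfl
  · exact le_of_lt (List.pairwise_iff_getElem.mp (pvOcc_pairwise k cs x) a b ha hb h)

lemma pvChunk (k : Int) (cs : List Char) (mN s : Nat) (x : List Char) (hs : s ≤ pvN k cs) :
    pvWin k cs mN s x = (pvOcc k cs x).countP (fun i => decide (s - mN ≤ i ∧ i < s)) := by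
  unfold pvWin pvOcc pvOccIs pvKmers
  rw [← List.map_take, ← List.map_drop, List.count_eq_countP, List.countP_map,
    List.countP_filter, List.take_range, Nat.min_eq_left hs]
  have h1 : List.range' 0 (s - mN) ++ List.range' (s - mN) (s - (s - mN)) = List.range s := by
    rw [List.range_eq_range']
    have h := @List.range'_append 0 (s - mN) (s - (s - mN)) 1
    simp only [Nat.one_mul, Nat.zero_add] at h
    rw [h]
    congr 1
    omega
  have h2 : List.range s ++ List.range' s (pvN k cs - s) = List.range (pvN k cs) := by
    rw [List.range_eq_range', List.range_eq_range']
    have h := @List.range'_append 0 s (pvN k cs - s) 1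
    simp only [Nat.one_mul, Nat.zero_add] at h
    rw [h]
    congr 1
    omega
  -- left side: the window is the middle chunk
  have hdrop : List.drop (s - mN) (List.range s) = List.range' (s - mN) (s - (s - mN)) := by
    rw [← h1, List.drop_left' (by rw [List.length_range'])]
  rw [hdrop, ← h2, ← h1]
  rw [List.countP_append, List.countP_append]
  have hz1 : List.countP (fun a => decide (s - mN ≤ a ∧ a < s) && decide (pvKm k cs a = x))
      (List.range' 0 (s - mN)) = 0 := by
    rw [List.countP_eq_zero]
    intro a ha
    rw [List.mem_range'] at ha
    obtain ⟨i, hi, rfl⟩ := ha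
    intro hcon
    rw [Bool.and_eq_true] at hcon
    have := of_decide_eq_true hcon.1
    omega
  have hz2 : List.countP (fun a => decide (s - mN ≤ a ∧ a < s) && decide (pvKm k cs a = x))
      (List.range' s (pvN k cs - s)) = 0 := by
    rw [List.countP_eq_zero]
    intro a ha
    rw [List.mem_range'] at ha
    obtain ⟨i, hi, rfl⟩ := ha
    intro hcon
    rw [Bool.and_eq_true] at hcon
    have := of_decide_eq_true hcon.1
    omega
  have hmid : List.countP (fun a => decide (s - mN ≤ a ∧ a < s) && decide (pvKm k cs a = x))
      (List.range' (s - mN) (s - (s - mN)))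
      = List.countP (fun i => decide (pvKm k cs i = x)) (List.range' (s - mN) (s - (s - mN))) := by
    apply List.countP_congr
    intro a ha
    rw [List.mem_range'] at ha
    obtain ⟨i, hi, rfl⟩ := ha
    rw [Bool.and_eq_true, decide_eq_true_eq]
    constructor
    · exact fun h => h.2
    · intro h
      exact ⟨by omega, h⟩
  have hconv : List.countP ((fun y => y == x) ∘ pvKm k cs) (List.range' (s - mN) (s - (s - mN)))
      = List.countP (fun i => decide (pvKm k cs i = x)) (List.range' (s - mN) (s - (s - mN))) := by
    apply List.countP_congr
    intro a _
    simp [Function.comp]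
  rw [hz1, hz2, hmid, hconv]
  omega

lemma pvFilterPrefix (d s : Nat) : ∀ (xs : List Nat), xs.Pairwise (· < ·) →
    (∀ i ∈ xs, d ≤ i) → xs.filter (fun i => decide (d ≤ i ∧ i < s)) <+: xs := by
  intro xs
  induction xs with
  | nil => simp
  | cons y ys ih =>
    intro hp hall
    rw [List.filter_cons]
    have hdy : d ≤ y := hall y List.mem_cons_self
    by_cases hy : y < s
    · rw [if_pos (by simp [hdy, hy])]
      obtain ⟨tl, htl⟩ := ih (List.pairwise_cons.mp hp).2 (fun i hi => hall i (List.mem_cons_of_mem _ hi))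
      exact ⟨tl, by rw [List.cons_append, htl]⟩
    · rw [if_neg (by simp [hy])]
      have hnil : ys.filter (fun i => decide (d ≤ i ∧ i < s)) = [] := by
        rw [List.filter_eq_nil_iff]
        intro a ha
        have : y < a := (List.pairwise_cons.mp hp).1 a ha
        simp
        omega
      rw [hnil]
      exact List.nil_prefix

lemma pvFilterInfix (d s : Nat) : ∀ (xs : List Nat), xs.Pairwise (· < ·) →
    xs.filter (fun i => decide (d ≤ i ∧ i < s)) <:+: xs := by
  intro xs
  induction xs with
  | nil => simp
  | cons y ys ih =>
    intro hp
    by_cases hdy : d ≤ y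
    · refine (pvFilterPrefix d s (y :: ys) hp ?_).isInfix
      intro i hi
      rcases List.mem_cons.mp hi with h | h
      · omega
      · have : y < i := (List.pairwise_cons.mp hp).1 i h
        omega
    · rw [List.filter_cons, if_neg (by simp; omega)]
      exact (ih (List.pairwise_cons.mp hp).2).trans (List.suffix_cons y ys).isInfix

lemma pvG_iff_B (k l t : Int) (cs : List Char) (x : List Char)
    (ht : 1 ≤ t) (hm : 1 ≤ l - k + 1) :
    pvG k l t cs x ↔ pvB k l t cs x := by
  have hmc : (((l - k + 1).toNat : Nat) : Int) = l - k + 1 := by omega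
  have htN : 1 ≤ t.toNat := by omega
  constructor
  · rintro ⟨j, b, hb1, hb2, hspan⟩
    set mN := (l - k + 1).toNat with hmN
    set occ := pvOcc k cs x with hocc
    have hj : j < occ.length := by omega
    set i0 := occ.getD b 0 with hi0
    have hbmem : i0 ∈ occ := by
      rw [hi0, pvGetD_eq _ _ hb2]
      exact List.getElem_mem _
    obtain ⟨hi0N, hkm⟩ := (pvOcc_mem k cs x i0).mp hbmem
    refine ⟨i0, hi0N, hkm, ?_⟩
    rw [pvChunk k cs mN (i0 + 1) x (by omega), ← hocc]
    have hseg : ((occ.drop j).take t.toNat).Sublist occ :=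
      (List.take_sublist _ _).trans (List.drop_sublist _ _)
    have hlen : ((occ.drop j).take t.toNat).length = t.toNat := by
      rw [List.length_take, List.length_drop]
      omega
    have hall : ∀ a ∈ (occ.drop j).take t.toNat,
        (fun i => decide (i0 + 1 - mN ≤ i ∧ i < i0 + 1)) a = true := by
      intro a ha
      obtain ⟨r, hr, hra⟩ := List.mem_iff_getElem.mp ha
      rw [List.getElem_take, List.getElem_drop] at hra
      have hjr : j + r < occ.length := by
        rw [hlen] at hr
        omega
      have hrb : j + r ≤ b := by
        rw [hlen] at hr
        omega
      have h1 := pvOcc_mono k cs x j (j + r) (by omega) hjr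
      have h2 := pvOcc_mono k cs x (j + r) b (by omega) hb2
      rw [← hocc] at h1 h2
      rw [pvGetD_eq occ (j + r) hjr, hra] at h1 h2
      simp only [decide_eq_true_eq]
      omega
    have hcntseg : List.countP (fun i => decide (i0 + 1 - mN ≤ i ∧ i < i0 + 1))
        ((occ.drop j).take t.toNat) = t.toNat := by
      rw [List.countP_eq_length_filter, List.filter_eq_self.mpr hall, hlen]
    have hle := List.Sublist.countP_le
      (p := fun i => decide (i0 + 1 - mN ≤ i ∧ i < i0 + 1)) hseg
    omega
  · rintro ⟨i0, hi0N, hkm, hwcnt⟩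
    set mN := (l - k + 1).toNat with hmN
    set occ := pvOcc k cs x with hocc
    rw [pvChunk k cs mN (i0 + 1) x (by omega), ← hocc] at hwcnt
    set ys := occ.filter (fun i => decide (i0 + 1 - mN ≤ i ∧ i < i0 + 1)) with hys
    have hcnt : occ.countP (fun i => decide (i0 + 1 - mN ≤ i ∧ i < i0 + 1)) = ys.length :=
      List.countP_eq_length_filter
    have hylen : t.toNat ≤ ys.length := by omega
    obtain ⟨pre, suf, hsplit⟩ := pvFilterInfix (i0 + 1 - mN) (i0 + 1) occ (pvOcc_pairwise k cs x)
    have hdropj : occ.drop pre.length = ys ++ suf := by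
      rw [← hsplit, List.append_assoc]
      exact List.drop_left' rfl
    have hocclen : occ.length = pre.length + (ys.length + suf.length) := by
      conv_lhs => rw [← hsplit]
      rw [List.length_append, List.length_append, ← hys]
      omega
    have hg : ∀ r, r < ys.length → occ.getD (pre.length + r) 0 = ys.getD r 0 := by
      intro r hr
      rw [List.getD_eq_getElem?_getD, List.getD_eq_getElem?_getD, ← List.getElem?_drop,
        hdropj, List.getElem?_append_left hr]
    have hysmem : ∀ r, r < ys.length → ys.getD r 0 ∈ ys := by
      intro r hr
      rw [pvGetD_eq _ _ hr]
      exact List.getElem_mem _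
    have hbound : ∀ a ∈ ys, i0 + 1 - mN ≤ a ∧ a < i0 + 1 := by
      intro a ha
      exact of_decide_eq_true (List.mem_filter.mp ha).2
    refine ⟨pre.length, pre.length + t.toNat - 1, by omega, by rw [← hocc]; omega, ?_⟩
    rw [← hocc]
    have hg0 : occ.getD pre.length 0 = ys.getD 0 0 := by
      have := hg 0 (by omega)
      simpa using this
    have e1 : pre.length + t.toNat - 1 = pre.length + (t.toNat - 1) := by omega
    rw [e1, hg (t.toNat - 1) (by omega), hg0]
    obtain ⟨hb1, hb2⟩ := hbound _ (hysmem (t.toNat - 1) (by omega))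
    obtain ⟨ha1, ha2⟩ := hbound _ (hysmem 0 (by omega))
    omega

lemma pvG_not_of_m_nonpos (k l t : Int) (cs : List Char) (x : List Char)
    (ht : 1 ≤ t) (hm : l - k + 1 ≤ 0) : ¬ pvG k l t cs x := by
  rintro ⟨j, b, hb1, hb2, hspan⟩
  have htN : 1 ≤ t.toNat := by omega
  have hmono := pvOcc_mono k cs x j b (by omega) hb2
  omega

lemma pvOfList_injective : Function.Injective String.ofList := by
  intro a b h
  have := congrArg String.toList h
  simpa [String.toList_ofList] using this

lemma clump_main (k l t : Int) (strand : String) (ht : 1 ≤ t) :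
    clump k l t strand = clump_alt k l t strand := by
  set cs := strand.toList with hcs
  by_cases hm : l - k + 1 ≤ 0
  · -- window shorter than a k-mer: no clumps on either side
    rw [clump_eq]
    have hB : clump_alt k l t strand = [] := by
      unfold clump_alt
      dsimp only
      rw [if_pos hm]
    have hfilter : (pvFt k cs (List.range (pvN k cs))).keys.filter (pvPA k l t cs) = [] := by
      rw [List.filter_eq_nil_iff]
      intro a _ hpa
      exact pvG_not_of_m_nonpos k l t cs a ht hm ((pvPA_iff_G k l t cs a ht).mp hpa)
    rw [hB, hfilter]
    rfl
  · have hm1 : 1 ≤ l - k + 1 := by omega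
    rw [clump_eq, clump_alt_eq k l t strand hm]
    apply PySem.List.sorted_eq_sorted_of_perm _ _ _ (fun a b hab => hab)
    obtain ⟨hinvC, hinvF, hinvN⟩ := pvStB_inv k l t cs hm1 (pvN k cs) le_rfl
    have hx : ∀ x : List Char,
        x ∈ (pvFt k cs (List.range (pvN k cs))).keys.filter (pvPA k l t cs) ↔
        x ∈ (pvStB k l t cs (pvN k cs)).2 := by
      intro x
      rw [List.mem_filter, pvFt_keys_mem, hinvF x]
      constructor
      · rintro ⟨⟨i, hi, hk⟩, hpa⟩
        exact (pvG_iff_B k l t cs x ht hm1).mp ((pvPA_iff_G k l t cs x ht).mp hpa)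
      · rintro ⟨i0, hi0, hkm, hw⟩
        exact ⟨⟨i0, List.mem_range.mpr hi0, hkm⟩,
          (pvPA_iff_G k l t cs x ht).mpr ((pvG_iff_B k l t cs x ht hm1).mpr ⟨i0, hi0, hkm, hw⟩)⟩
    rw [List.perm_ext_iff_of_nodup
      (List.Nodup.map pvOfList_injective (List.Nodup.filter _ (pvFt_keys_nodup k cs _)))
      (List.Nodup.map pvOfList_injective hinvN)]
    intro a
    simp only [List.mem_map]
    constructor
    · rintro ⟨x, hx1, rfl⟩
      exact ⟨x, (hx x).mp hx1, rfl⟩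
    · rintro ⟨x, hx1, rfl⟩
      exact ⟨x, (hx x).mpr hx1, rfl⟩

-- ===== VERDICT (by name: the statement is the Claim_ definition above) =====
theorem clump_spec : Claim_equal_clump := by
  intro k l t strand _ hpre
  unfold Spec_clump
  exact clump_main k l t strand hpre
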